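-- pv_equiv track=rewrite | github.com/Nadben/Projet-Poker | poker_un_joueur.py | carre
-- ===== SOURCE A (Python) =====
-- def carre(cartes_joueur,cartes_devoile,pari):
--     resultat = 0
--     #prend toutes les cartes sur le jeux pour en faire les cartes du joeuur
-- ##    for t in range(len(cartes_devoile)):
-- ##        cartes_joueur.append(cartes_devoile[t])
-- ##
--     dic={}
--     carre = 0
--     resultat=0
--     for m,n in cartes_devoile :
--         dic[m] = dic.get(m,0) + 1
--
--     for g,h in dic.items():
--         if( h>=4 ): carre+=1
--
--     if(carre==1):resultat = 1
--
--     return resultat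
-- ===== SOURCE B (Python) =====
-- def carre(cartes_joueur, cartes_devoile, pari):
--     # Peel algorithm: repeatedly take the first remaining rank, strip every
--     # occurrence of it, and record whether that rank formed a four-of-a-kind.
--     ranks = [m for m, n in cartes_devoile]
--     nb_carres = 0
--     while ranks:
--         r = ranks[0]
--         rest = [x for x in ranks if x != r]
--         if len(ranks) - len(rest) >= 4:
--             nb_carres += 1
--         ranks = rest
--     return 1 if nb_carres == 1 else 0
-- ===== Notes on version B (the rewrite author's own statement) =====
-- stated objective: alternative
-- what changed: Replaced A's build-a-frequency-dict-then-scan-its-items two-stage tally by a peel loop: repeatedly strip every occurrence of the first remaining rank from the rank list and record whether that rank had at least four copies.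
import Mathlib
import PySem

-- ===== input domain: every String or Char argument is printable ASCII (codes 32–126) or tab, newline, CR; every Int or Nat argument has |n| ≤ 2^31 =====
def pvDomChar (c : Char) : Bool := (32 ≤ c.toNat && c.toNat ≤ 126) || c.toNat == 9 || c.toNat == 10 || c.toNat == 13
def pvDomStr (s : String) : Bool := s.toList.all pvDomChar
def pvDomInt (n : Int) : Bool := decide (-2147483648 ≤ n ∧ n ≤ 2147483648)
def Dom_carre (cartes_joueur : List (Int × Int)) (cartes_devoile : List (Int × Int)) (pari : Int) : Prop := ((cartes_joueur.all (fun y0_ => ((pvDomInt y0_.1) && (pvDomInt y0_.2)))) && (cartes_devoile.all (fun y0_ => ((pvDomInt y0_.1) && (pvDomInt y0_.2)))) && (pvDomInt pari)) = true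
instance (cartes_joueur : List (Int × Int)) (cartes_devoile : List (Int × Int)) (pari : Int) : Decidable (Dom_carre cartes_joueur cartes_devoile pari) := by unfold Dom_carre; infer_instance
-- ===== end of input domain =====

-- B replaces A's frequency-dict tally by a peel loop: repeatedly strip all copies of the first
-- remaining rank and record whether that rank had four copies (alternative decomposition, not faster).

-- ===== PORT A =====
def carre (cartes_joueur : List (Int × Int)) (cartes_devoile : List (Int × Int)) (pari : Int) : Int :=
  -- resultat = 0; dic = {}; carre = 0
  let dic : PySem.Dict Int Int :=
    cartes_devoile.foldl (fun d p => d.insert p.1 (d.getD p.1 0 + 1)) PySem.Dict.empty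
  let carreCnt : Int :=
    dic.items.foldl (fun c p => if p.2 ≥ 4 then c + 1 else c) 0
  if carreCnt = 1 then 1 else 0

-- ===== PORT B =====
-- the while loop of Source B: peel the first remaining rank, keep the rest
def pvPeelLoop : List Int → Int → Int
  | [], nb => nb
  | r :: t, nb =>
      pvPeelLoop (t.filter (fun x => x ≠ r))
        (if (4 : Int) ≤ (1 + (t.length : Int)) - (t.filter (fun x => x ≠ r)).length then nb + 1 else nb)
  termination_by l _ => l.length
  decreasing_by
    simp only [List.length_cons]
    have h := List.length_filter_le (fun x : {x // x ∈ t} => decide ((x : Int) ≠ r)) t.attach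
    simp at h ⊢
    omega

def carre_alt (cartes_joueur : List (Int × Int)) (cartes_devoile : List (Int × Int)) (pari : Int) : Int :=
  let ranks : List Int := cartes_devoile.map (fun p => p.1)
  let nbCarres : Int := pvPeelLoop ranks 0
  if nbCarres = 1 then 1 else 0

-- ===== PRECONDITION & SPEC =====
def Spec_carre (cartes_joueur : List (Int × Int)) (cartes_devoile : List (Int × Int)) (pari : Int) (out : Int) : Prop := out = carre_alt cartes_joueur cartes_devoile pari
instance (cartes_joueur : List (Int × Int)) (cartes_devoile : List (Int × Int)) (pari : Int) (out : Int) : Decidable (Spec_carre cartes_joueur cartes_devoile pari out) := by unfold Spec_carre; infer_instance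

-- ===== CLAIM (what is proved, stated in full; the proofs are below) =====
def Claim_equal_carre : Prop := ∀ (cartes_joueur : List (Int × Int)) (cartes_devoile : List (Int × Int)) (pari : Int), Dom_carre cartes_joueur cartes_devoile pari → Spec_carre cartes_joueur cartes_devoile pari (carre cartes_joueur cartes_devoile pari)

-- ===== LEMMAS AND PROOFS =====

-- A's second loop (count items with value ≥ 4) equals a 0/1-sum over the same key list.
theorem foldl_ge4_eq_sum (l : List Int) (f : Int → Nat) (a : Int) :
    (l.map (fun k => (k, (f k : Int)))).foldl (fun c p => if p.2 ≥ 4 then c + 1 else c) a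
      = a + (l.map (fun k => if (4 : Int) ≤ (f k : Int) then (1 : Int) else 0)).sum := by
  induction l generalizing a with
  | nil => simp
  | cons x t ih =>
      simp only [List.map_cons, List.foldl_cons, List.sum_cons, ih, ge_iff_le]
      by_cases h : (4 : Int) ≤ (f x : Int)
      · simp [h]; ring
      · simp [h]

-- lengths: removing every copy of r from t removes exactly t.count r elements
theorem filter_ne_length_add_count (t : List Int) (r : Int) :
    (t.filter (fun x => x ≠ r)).length + t.count r = t.length := by
  induction t with
  | nil => simp
  | cons x s ih =>
      by_cases h : x = r <;>
        simp_all [List.length_cons] <;> omega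

-- B's peel loop computes nb plus the 0/1-sum, over the distinct ranks, of "count ≥ 4".
theorem peelLoop_eq (n : Nat) : ∀ l : List Int, l.length ≤ n → ∀ nb : Int,
    pvPeelLoop l nb
      = nb + ((PySem.Set.ofList l).map (fun k => if (4 : Int) ≤ (l.count k : Int) then (1 : Int) else 0)).sum := by
  induction n with
  | zero =>
      intro l hl nb
      have h0 : l = [] := List.eq_nil_of_length_eq_zero (Nat.le_zero.mp hl)
      subst h0
      simp [pvPeelLoop, PySem.Set.ofList_nil]
  | succ n ih =>
      intro l hl nb
      match l with
      | [] => simp [pvPeelLoop, PySem.Set.ofList_nil]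
      | r :: t =>
          rw [pvPeelLoop]
          set rest := t.filter (fun x => x ≠ r) with hrest
          have hfle : rest.length ≤ t.length := by
            rw [hrest]; exact List.length_filter_le _ _
          have ht : t.length ≤ n := by simpa using hl
          rw [ih rest (le_trans hfle ht)]
          have hcount : rest.length + t.count r = t.length := by
            rw [hrest]; exact filter_ne_length_add_count t r
          -- the sum over ofList (r :: t): head r contributes the condition, tail is over rest
          rw [PySem.Set.ofList_cons]
          simp only [List.map_cons, List.sum_cons, List.count_cons_self]
          -- rewrite the tail map: on discard (ofList t) r, counts in (r::t) equal counts in rest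
          have htail :
              ((PySem.Set.discard (PySem.Set.ofList t) r).map
                 (fun k => if (4 : Int) ≤ ((r :: t).count k : Int) then (1 : Int) else 0)).sum
              = ((PySem.Set.ofList rest).map
                 (fun k => if (4 : Int) ≤ (rest.count k : Int) then (1 : Int) else 0)).sum := by
            have hmapeq :
                (PySem.Set.discard (PySem.Set.ofList t) r).map
                   (fun k => if (4 : Int) ≤ ((r :: t).count k : Int) then (1 : Int) else 0)
                = (PySem.Set.discard (PySem.Set.ofList t) r).map
                   (fun k => if (4 : Int) ≤ (rest.count k : Int) then (1 : Int) else 0) := by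
              apply List.map_congr_left
              intro k hk
              have hk' := (PySem.Set.mem_discard _ _ _).mp hk
              have hkne : k ≠ r := hk'.2
              have hc1 : (r :: t).count k = t.count k := by
                have h' : ¬ r = k := fun hh => hkne hh.symm
                simp [h']
              have hc2 : rest.count k = t.count k := by
                simp [hrest, List.count_filter, hkne]
              rw [hc1, hc2]
            rw [hmapeq]
            -- permutation: discard (ofList t) r ~ ofList rest
            have hperm : (PySem.Set.discard (PySem.Set.ofList t) r).Perm (PySem.Set.ofList rest) := by
              rw [List.perm_ext_iff_of_nodup
                    (PySem.Set.nodup_discard _ _ (PySem.Set.nodup_ofList t))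
                    (PySem.Set.nodup_ofList rest)]
              intro a
              simp [PySem.Set.mem_discard, PySem.Set.mem_ofList, hrest, List.mem_filter,
                    and_comm]
            exact (hperm.map _).sum_eq
          rw [htail]
          -- finish: align the head condition and the accumulator
          have hiff : ((4 : Int) ≤ (1 + (t.length : Int)) - rest.length)
                    ↔ ((4 : Int) ≤ ((t.count r + 1 : Nat) : Int)) := by
            push_cast
            omega
          by_cases hc : (4 : Int) ≤ (1 + (t.length : Int)) - rest.length
          · simp only [hc, hiff.mp hc, if_true]
            ring
          · have hc2 : ¬ ((4 : Int) ≤ ((t.count r + 1 : Nat) : Int)) := fun hx => hc (hiff.mpr hx)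
            simp only [hc, hc2, if_false]
            ring

theorem peelLoop_eq' (l : List Int) (nb : Int) :
    pvPeelLoop l nb
      = nb + ((PySem.Set.ofList l).map (fun k => if (4 : Int) ≤ (l.count k : Int) then (1 : Int) else 0)).sum :=
  peelLoop_eq l.length l (Nat.le_refl _) nb

-- ===== VERDICT (by name: the statement is the Claim_ definition above) =====
theorem carre_spec : Claim_equal_carre := by
  intro cj cd pari _
  unfold Spec_carre carre carre_alt
  have hfold :
      cd.foldl (fun d p => d.insert p.1 (d.getD p.1 0 + 1)) PySem.Dict.empty
        = PySem.Dict.counter (cd.map (fun p => p.1)) := by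
    exact (List.foldl_map (f := fun p : Int × Int => p.1)
        (g := fun (d : PySem.Dict Int Int) x => d.insert x (d.getD x 0 + 1))).symm.trans
      (PySem.Dict.foldl_insert_getD_add_one_eq_counter _)
  simp only [hfold, PySem.Dict.items_counter, foldl_ge4_eq_sum, peelLoop_eq']
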